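-- pv_equiv track=rewrite | github.com/RTR-Tsaar/Racing-Team-Rotterdam | CAN_bus_algemeen/Autritthem.py | compare_all_ids
-- ===== SOURCE A (Python) =====
-- def compare_all_ids(ids):
--     # Convert decimal IDs to 11-bit binary strings
--     ids_bin = [format(id, '011b') for id in ids]
--
--     # Initialize the comparison result with all bits set to 'X'
--     comparison_result = ['X'] * 11
--
--     # Compare each bit position across all IDs
--     for i in range(11):
--         bit_set = {id_bin[i] for id_bin in ids_bin}
--         if len(bit_set) == 1:
--             comparison_result[i] = bit_set.pop()
--
--     return ''.join(comparison_result)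
-- ===== SOURCE B (Python) =====
-- def compare_all_ids(ids):
--     # Row-wise streaming merge: keep the first id's padded binary string and
--     # X out any column where a later id disagrees; no per-column sets.
--     if not ids:
--         return 'X' * 11
--     res = list(format(ids[0], '011b')[:11])
--     for id in ids[1:]:
--         s = format(id, '011b')
--         for i in range(11):
--             if res[i] != 'X' and res[i] != s[i]:
--                 res[i] = 'X'
--     return ''.join(res)
-- ===== Notes on version B (the rewrite author's own statement) =====
-- stated objective: alternative
-- what changed: B replaces A's column-major pass (a set of the i-th characters of all pre-built binary strings per column) by a row-major streaming merge: it keeps the first id's padded binary string and Xes out any column where a later id's string disagrees, so no string list and no sets are ever materialised.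
import Mathlib
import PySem

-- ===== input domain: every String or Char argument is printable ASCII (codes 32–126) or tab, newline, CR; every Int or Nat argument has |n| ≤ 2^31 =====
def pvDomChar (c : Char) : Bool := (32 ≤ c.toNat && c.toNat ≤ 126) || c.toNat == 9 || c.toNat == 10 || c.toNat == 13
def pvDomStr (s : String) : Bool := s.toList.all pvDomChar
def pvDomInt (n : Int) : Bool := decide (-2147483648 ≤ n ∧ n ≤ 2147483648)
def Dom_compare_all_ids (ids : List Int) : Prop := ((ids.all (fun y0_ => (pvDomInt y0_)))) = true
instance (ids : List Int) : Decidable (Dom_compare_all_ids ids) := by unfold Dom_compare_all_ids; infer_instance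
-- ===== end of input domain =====

-- B replaces A's per-column character sets by a row-major streaming merge of the
-- padded binary strings (objective: alternative decomposition, same cost class).


-- ===== SHARED HELPER (port of the builtin format(id, '011b'), used by both Pythons) =====
-- binary digits of n, most significant first (no digits for 0)
def pvBits (n : Nat) : List Char :=
  if h : n = 0 then []
  else pvBits (n / 2) ++ [if n % 2 = 1 then '1' else '0']
  decreasing_by exact Nat.div_lt_self (Nat.pos_of_ne_zero h) (by norm_num)

-- format(id, '011b'): '-' sign for negatives, then the binary digits of |id|,
-- zero-padded (after the sign) to a total width of 11; exact for every Python int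
def pvFormat011b (id : Int) : List Char :=
  let digits := if id.natAbs = 0 then ['0'] else pvBits id.natAbs
  if id < 0 then '-' :: (List.replicate (10 - digits.length) '0' ++ digits)
  else List.replicate (11 - digits.length) '0' ++ digits

-- ===== PORT A =====
def compare_all_ids (ids : List Int) : String :=
  -- ids_bin = [format(id, '011b') for id in ids]
  let ids_bin : List (List Char) := ids.map pvFormat011b
  -- comparison_result = ['X'] * 11
  let comparison_result : List Char := List.replicate 11 'X'
  -- for i in range(11): bit_set = {id_bin[i] for id_bin in ids_bin}; …
  -- (id_bin[i]: i < 11 ≤ len(id_bin) always, so getD's default is unreachable;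
  --  bit_set.pop(): the set has exactly one element there, ported as headD)
  let r := (List.range 11).foldl (fun acc i =>
    let bit_set : PySem.Set Char :=
      PySem.Set.ofList (ids_bin.map (fun id_bin => id_bin.getD i ' '))
    if bit_set.length = 1 then acc.set i (bit_set.headD 'X') else acc) comparison_result
  String.ofList r

-- ===== PORT B =====
def compare_all_ids_alt (ids : List Int) : String :=
  match ids with
  | [] => "XXXXXXXXXXX"
  | x :: rest =>
    -- res = list(format(ids[0], '011b')[:11])
    let res0 : List Char := (pvFormat011b x).take 11
    -- for id in ids[1:]: s = format(id, '011b'); for i in range(11): …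
    -- (res[i], s[i]: i is always in range, the getD defaults are unreachable)
    let res := rest.foldl (fun res id =>
      let s := pvFormat011b id
      (List.range 11).foldl (fun acc i =>
        if acc.getD i 'X' ≠ 'X' ∧ acc.getD i 'X' ≠ s.getD i ' '
        then acc.set i 'X' else acc) res) res0
    String.ofList res

-- ===== PRECONDITION & SPEC =====
def Spec_compare_all_ids (ids : List Int) (out : String) : Prop := out = compare_all_ids_alt ids
instance (ids : List Int) (out : String) : Decidable (Spec_compare_all_ids ids out) := by
  unfold Spec_compare_all_ids; infer_instance

-- ===== CLAIM (what is proved, stated in full; the proofs are below) =====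
def Claim_equal_compare_all_ids : Prop := ∀ (ids : List Int), Dom_compare_all_ids ids → Spec_compare_all_ids ids (compare_all_ids ids)

-- ===== LEMMAS AND PROOFS =====

-- the i-th character of id's padded binary string (proof-side abbreviation)
def pvCh (y : Int) (j : Nat) : Char := (pvFormat011b y).getD j ' '

-- format(id, '011b') is at least 11 characters long
lemma pv_format_len (id : Int) : 11 ≤ (pvFormat011b id).length := by
  unfold pvFormat011b
  set digits := if id.natAbs = 0 then ['0'] else pvBits id.natAbs with hd
  by_cases h : id < 0
  · simp only [if_pos h, List.length_cons, List.length_append, List.length_replicate]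
    omega
  · simp only [if_neg h, List.length_append, List.length_replicate]
    omega

-- length of A's update loop
lemma pv_foldl_set_length (c : Nat → Prop) [DecidablePred c] (w : Nat → Char) :
    ∀ (L : List Nat) (init : List Char),
      (L.foldl (fun acc i => if c i then acc.set i (w i) else acc) init).length
        = init.length := by
  intro L
  induction L with
  | nil => intro init; rfl
  | cons a L ih =>
    intro init
    simp only [List.foldl_cons]
    rw [ih]
    split <;> simp

-- getElem? of A's update loop over range n (value written at i depends only on i)
lemma pv_foldl_set_get (c : Nat → Prop) [DecidablePred c] (w : Nat → Char) :
    ∀ (n : Nat) (init : List Char) (j : Nat), j < init.length →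
      ((List.range n).foldl (fun acc i => if c i then acc.set i (w i) else acc) init)[j]?
        = if j < n ∧ c j then some (w j) else init[j]? := by
  intro n
  induction n with
  | zero => intro init j hj; simp
  | succ n ih =>
    intro init j hj
    rw [List.range_succ, List.foldl_append]
    have hlen : ((List.range n).foldl
        (fun acc i => if c i then acc.set i (w i) else acc) init).length = init.length :=
      pv_foldl_set_length c w (List.range n) init
    simp only [List.foldl_cons, List.foldl_nil]
    by_cases hc : c n
    · simp only [if_pos hc]
      by_cases hjn : j = n
      · subst hjn
        rw [List.getElem?_set_self (by omega)]
        rw [if_pos ⟨by omega, hc⟩]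
      · rw [List.getElem?_set_ne (by omega)]
        rw [ih init j hj]
        by_cases hlt : j < n
        · by_cases hcj : c j
          · rw [if_pos ⟨hlt, hcj⟩, if_pos ⟨by omega, hcj⟩]
          · rw [if_neg (fun h => hcj h.2), if_neg (fun h => hcj h.2)]
        · have h1 : ¬ (j < n ∧ c j) := fun h => hlt h.1
          have h2 : ¬ (j < n + 1 ∧ c j) := fun h => (by omega : ¬ j < n + 1) h.1
          rw [if_neg h1, if_neg h2]
    · simp only [if_neg hc]
      rw [ih init j hj]
      by_cases hcj : c j
      · by_cases hlt : j < n
        · rw [if_pos ⟨hlt, hcj⟩, if_pos ⟨by omega, hcj⟩]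
        · have h2 : ¬ (j < n + 1 ∧ c j) := by
            intro h
            have hjn : j = n := by omega
            exact hc (hjn ▸ hcj)
          rw [if_neg (fun h => hlt h.1), if_neg h2]
      · rw [if_neg (fun h => hcj h.2), if_neg (fun h => hcj h.2)]

-- length of B's inner merge loop
lemma pv_foldl_merge_length (s : List Char) :
    ∀ (L : List Nat) (init : List Char),
      (L.foldl (fun acc i =>
        if acc.getD i 'X' ≠ 'X' ∧ acc.getD i 'X' ≠ s.getD i ' '
        then acc.set i 'X' else acc) init).length = init.length := by
  intro L
  induction L with
  | nil => intro init; rfl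
  | cons a L ih =>
    intro init
    simp only [List.foldl_cons]
    rw [ih]
    split <;> simp

-- getElem? of B's inner merge loop over range n (index i reads only acc[i])
lemma pv_foldl_merge_get (s : List Char) :
    ∀ (n : Nat) (init : List Char) (j : Nat), j < init.length →
      ((List.range n).foldl (fun acc i =>
        if acc.getD i 'X' ≠ 'X' ∧ acc.getD i 'X' ≠ s.getD i ' '
        then acc.set i 'X' else acc) init)[j]?
      = if j < n ∧ (init.getD j 'X' ≠ 'X' ∧ init.getD j 'X' ≠ s.getD j ' ')
        then some 'X' else init[j]? := by
  intro n
  induction n with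
  | zero => intro init j hj; simp
  | succ n ih =>
    intro init j hj
    rw [List.range_succ, List.foldl_append]
    have hlen : ((List.range n).foldl (fun acc i =>
        if acc.getD i 'X' ≠ 'X' ∧ acc.getD i 'X' ≠ s.getD i ' '
        then acc.set i 'X' else acc) init).length = init.length :=
      pv_foldl_merge_length s (List.range n) init
    simp only [List.foldl_cons, List.foldl_nil]
    have hgn : ∀ m : Nat, ¬ m < n →
        ((List.range n).foldl (fun acc i =>
          if acc.getD i 'X' ≠ 'X' ∧ acc.getD i 'X' ≠ s.getD i ' '
          then acc.set i 'X' else acc) init).getD m 'X' = init.getD m 'X' := by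
      intro m hm
      by_cases hml : m < init.length
      · rw [List.getD_eq_getElem?_getD, ih init m hml,
            if_neg (fun h => hm h.1), ← List.getD_eq_getElem?_getD]
      · rw [List.getD_eq_getElem?_getD, List.getD_eq_getElem?_getD,
            List.getElem?_eq_none (by omega), List.getElem?_eq_none (by omega)]
    by_cases hc : (init.getD n 'X' ≠ 'X' ∧ init.getD n 'X' ≠ s.getD n ' ')
    · rw [if_pos (by rw [hgn n (by omega)]; exact hc)]
      by_cases hjn : j = n
      · subst hjn
        rw [List.getElem?_set_self (by omega), if_pos ⟨by omega, hc⟩]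
      · rw [List.getElem?_set_ne (by omega), ih init j hj]
        by_cases hlt : j < n
        · by_cases hcj : init.getD j 'X' ≠ 'X' ∧ init.getD j 'X' ≠ s.getD j ' '
          · rw [if_pos ⟨hlt, hcj⟩, if_pos ⟨by omega, hcj⟩]
          · rw [if_neg (fun h => hcj h.2), if_neg (fun h => hcj h.2)]
        · have h1 : ¬ (j < n ∧ (init.getD j 'X' ≠ 'X' ∧ init.getD j 'X' ≠ s.getD j ' ')) :=
            fun h => hlt h.1
          have h2 : ¬ (j < n + 1 ∧ (init.getD j 'X' ≠ 'X' ∧ init.getD j 'X' ≠ s.getD j ' ')) :=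
            fun h => (by omega : ¬ j < n + 1) h.1
          rw [if_neg h1, if_neg h2]
    · rw [if_neg (by rw [hgn n (by omega)]; exact hc)]
      rw [ih init j hj]
      by_cases hcj : init.getD j 'X' ≠ 'X' ∧ init.getD j 'X' ≠ s.getD j ' '
      · by_cases hlt : j < n
        · rw [if_pos ⟨hlt, hcj⟩, if_pos ⟨by omega, hcj⟩]
        · have h2 : ¬ (j < n + 1 ∧ (init.getD j 'X' ≠ 'X' ∧ init.getD j 'X' ≠ s.getD j ' ')) := by
            intro h
            have hjn : j = n := by omega
            exact hc (hjn ▸ hcj)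
          rw [if_neg (fun h => hlt h.1), if_neg h2]
      · rw [if_neg (fun h => hcj h.2), if_neg (fun h => hcj h.2)]

-- B's outer fold: invariant "column j is the first id's char while all processed ids agree"
lemma pv_merge_fold (x : Int) :
    ∀ (l : List Int) (a : Nat → Bool) (res : List Char), res.length = 11 →
      (∀ j, j < 11 → res[j]? = some (if a j then pvCh x j else 'X')) →
      (∀ j, j < 11 →
        (l.foldl (fun res id =>
          (List.range 11).foldl (fun acc i =>
            if acc.getD i 'X' ≠ 'X' ∧ acc.getD i 'X' ≠ (pvFormat011b id).getD i ' '
            then acc.set i 'X' else acc) res) res)[j]?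
        = some (if a j && l.all (fun y => pvCh y j == pvCh x j) then pvCh x j else 'X'))
      ∧ (l.foldl (fun res id =>
          (List.range 11).foldl (fun acc i =>
            if acc.getD i 'X' ≠ 'X' ∧ acc.getD i 'X' ≠ (pvFormat011b id).getD i ' '
            then acc.set i 'X' else acc) res) res).length = 11 := by
  intro l
  induction l with
  | nil =>
    intro a res hlen hres
    refine ⟨fun j hj => ?_, hlen⟩
    rw [List.foldl_nil, hres j hj]
    simp
  | cons y l ih =>
    intro a res hlen hres
    simp only [List.foldl_cons]
    have hlen1 : ((List.range 11).foldl (fun acc i =>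
        if acc.getD i 'X' ≠ 'X' ∧ acc.getD i 'X' ≠ (pvFormat011b y).getD i ' '
        then acc.set i 'X' else acc) res).length = 11 := by
      rw [pv_foldl_merge_length]; exact hlen
    have hres1 : ∀ j, j < 11 →
        ((List.range 11).foldl (fun acc i =>
          if acc.getD i 'X' ≠ 'X' ∧ acc.getD i 'X' ≠ (pvFormat011b y).getD i ' '
          then acc.set i 'X' else acc) res)[j]?
        = some (if (a j && (pvCh y j == pvCh x j)) then pvCh x j else 'X') := by
      intro j hj
      rw [pv_foldl_merge_get (pvFormat011b y) 11 res j (by omega)]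
      have hgd : res.getD j 'X' = if a j then pvCh x j else 'X' := by
        rw [List.getD_eq_getElem?_getD, hres j hj]; rfl
      have hyj : (pvFormat011b y).getD j ' ' = pvCh y j := rfl
      cases ha : a j
      · rw [ha, if_neg Bool.false_ne_true] at hgd
        rw [if_neg (fun h => h.2.1 (by rw [hgd])), hres j hj, ha]
        simp
      · rw [ha, if_pos rfl] at hgd
        rw [hyj, hgd]
        by_cases hxy : pvCh y j = pvCh x j
        · rw [if_neg (fun h => h.2.2 hxy.symm), hres j hj, ha]
          simp [hxy]
        · by_cases hX : pvCh x j = 'X'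
          · rw [if_neg (fun h => h.2.1 hX), hres j hj, ha]
            simp [hX, beq_iff_eq]
          · rw [if_pos ⟨hj, hX, fun h => hxy h.symm⟩]
            simp [beq_iff_eq, hxy]
    have := ih (fun j => a j && (pvCh y j == pvCh x j)) _ hlen1 hres1
    refine ⟨fun j hj => ?_, this.2⟩
    rw [(this.1 j hj)]
    simp [Bool.and_assoc]

-- ===== VERDICT (by name: the statement is the Claim_ definition above) =====
-- a Python set built from a constant nonempty list is the singleton
lemma pv_foldl_add_const (c0 : Char) :
    ∀ (cs : List Char), (∀ c ∈ cs, c = c0) → cs.foldl PySem.Set.add [c0] = [c0] := by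
  intro cs
  induction cs with
  | nil => intro _; rfl
  | cons a cs ih =>
    intro h
    have ha : a = c0 := h a (List.mem_cons_self)
    subst ha
    simp only [List.foldl_cons]
    rw [show PySem.Set.add [a] a = [a] by simp [PySem.Set.add, PySem.Set.contains]]
    exact ih (fun c hc => h c (List.mem_cons_of_mem a hc))

lemma pv_ofList_const (c0 : Char) (cs : List Char) (h : ∀ c ∈ cs, c = c0) :
    PySem.Set.ofList (c0 :: cs) = [c0] := by
  rw [PySem.Set.ofList_eq_foldl]
  simp only [List.foldl_cons]
  rw [show PySem.Set.add ([] : PySem.Set Char) c0 = [c0] by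
    simp [PySem.Set.add, PySem.Set.contains]]
  exact pv_foldl_add_const c0 cs h

-- set-size-1 characterisation
lemma pv_ofList_len_one (c0 : Char) (cs : List Char) :
    (PySem.Set.ofList (c0 :: cs)).length = 1 ↔ ∀ c ∈ cs, c = c0 := by
  constructor
  · intro hlen c hc
    obtain ⟨e, he⟩ := List.length_eq_one_iff.mp hlen
    have h0 : c0 ∈ PySem.Set.ofList (c0 :: cs) :=
      (PySem.Set.mem_ofList _ _).mpr (List.mem_cons_self)
    have hcmem : c ∈ PySem.Set.ofList (c0 :: cs) :=
      (PySem.Set.mem_ofList _ _).mpr (List.mem_cons_of_mem c0 hc)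
    rw [he] at h0 hcmem
    simp only [List.mem_singleton] at h0 hcmem
    rw [hcmem, h0]
  · intro h
    rw [pv_ofList_const c0 cs h]
    rfl

-- headD of the singleton set
lemma pv_ofList_headD (c0 : Char) (cs : List Char) (h : ∀ c ∈ cs, c = c0) :
    (PySem.Set.ofList (c0 :: cs)).headD 'X' = c0 := by
  rw [pv_ofList_const c0 cs h]
  rfl

-- one column: A's set test agrees with B's surviving-merge value
lemma pv_col (x : Int) (rest : List Int) (j : Nat) :
    (if (PySem.Set.ofList ((x :: rest).map (fun y => pvCh y j))).length = 1
     then (PySem.Set.ofList ((x :: rest).map (fun y => pvCh y j))).headD 'X'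
     else 'X')
    = (if (true && rest.all (fun y => pvCh y j == pvCh x j)) then pvCh x j else 'X') := by
  rw [List.map_cons, Bool.true_and]
  by_cases hall : ∀ y ∈ rest, pvCh y j = pvCh x j
  · have hcs : ∀ c ∈ rest.map (fun y => pvCh y j), c = pvCh x j := by
      intro c hc
      obtain ⟨y, hy, rfl⟩ := List.mem_map.mp hc
      exact hall y hy
    rw [if_pos ((pv_ofList_len_one _ _).mpr hcs), pv_ofList_headD _ _ hcs,
        if_pos (List.all_eq_true.mpr (fun y hy => beq_iff_eq.mpr (hall y hy)))]
  · rw [not_forall] at hall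
    simp only [not_forall, exists_prop] at hall
    obtain ⟨y, hy, hne⟩ := hall
    have hlen : ¬ (PySem.Set.ofList
        (pvCh x j :: rest.map (fun y => pvCh y j))).length = 1 := by
      intro hlen1
      exact hne ((pv_ofList_len_one _ _).mp hlen1 (pvCh y j) (List.mem_map.mpr ⟨y, hy, rfl⟩))
    have hallb : rest.all (fun y => pvCh y j == pvCh x j) = false :=
      List.all_eq_false.mpr ⟨y, hy, by simp [beq_iff_eq, hne]⟩
    rw [if_neg hlen, hallb, if_neg Bool.false_ne_true]

-- ===== VERDICT (by name: the statement is the Claim_ definition above) =====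
theorem compare_all_ids_spec : Claim_equal_compare_all_ids := by
  intro ids hdom
  unfold Spec_compare_all_ids
  cases ids with
  | nil => decide
  | cons x rest =>
    simp only [compare_all_ids, compare_all_ids_alt]
    congr 1
    have hlen0 : ((pvFormat011b x).take 11).length = 11 := by
      have := pv_format_len x
      simp only [List.length_take]
      omega
    have hres0 : ∀ j, j < 11 →
        ((pvFormat011b x).take 11)[j]? = some (if (fun _ : Nat => true) j then pvCh x j else 'X') := by
      intro j hj
      have hjl : j < (pvFormat011b x).length := by have := pv_format_len x; omega
      rw [if_pos rfl, List.getElem?_take_of_lt hj, List.getElem?_eq_getElem hjl]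
      have : pvCh x j = (pvFormat011b x)[j] := by
        rw [pvCh, List.getD_eq_getElem?_getD, List.getElem?_eq_getElem hjl]
        rfl
      rw [this]
    have hB := pv_merge_fold x rest (fun _ => true) ((pvFormat011b x).take 11) hlen0 hres0
    apply List.ext_getElem?
    intro j
    by_cases hj : j < 11
    · rw [pv_foldl_set_get
        (fun i => (PySem.Set.ofList (((x :: rest).map pvFormat011b).map
          (fun id_bin => id_bin.getD i ' '))).length = 1)
        (fun i => (PySem.Set.ofList (((x :: rest).map pvFormat011b).map
          (fun id_bin => id_bin.getD i ' '))).headD 'X')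
        11 (List.replicate 11 'X') j (by simpa using hj)]
      rw [hB.1 j hj]
      simp only [hj, true_and]
      rw [List.getElem?_replicate, if_pos hj, List.map_map]
      rw [show ((fun id_bin : List Char => id_bin.getD j ' ') ∘ pvFormat011b)
            = (fun y => pvCh y j) from rfl]
      rw [← apply_ite some]
      exact congrArg some (pv_col x rest j)
    · have h1 := pv_foldl_set_length
        (fun i => (PySem.Set.ofList (((x :: rest).map pvFormat011b).map
          (fun id_bin => id_bin.getD i ' '))).length = 1)
        (fun i => (PySem.Set.ofList (((x :: rest).map pvFormat011b).map
          (fun id_bin => id_bin.getD i ' '))).headD 'X')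
        (List.range 11) (List.replicate 11 'X')
      rw [List.getElem?_eq_none (by rw [h1]; simp; omega),
          List.getElem?_eq_none (by rw [hB.2]; omega)]
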